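-- pv_equiv track=rewrite | github.com/BerBai/codedb | MarsCode/寻找最大葫芦.py | solution
-- ===== SOURCE A (Python) =====
-- from collections import Counter
--
-- def solution(n, max, array):
--     # 牌面值映射：A=1, K=13, Q=12, J=11, ..., 2=2
--     value_map = {1: 'A', 13: 'K', 12: 'Q', 11: 'J', 10: '10', 9: '9', 8: '8', 7: '7', 6: '6', 5: '5', 4: '4', 3: '3', 2: '2'}
--
--     # 统计每张牌出现的次数
--     count = Counter(array)
--
--     # 可能的葫芦组合
--     full_houses = []
--
--     # 寻找三张相同的牌和两张相同的牌
--     for value, cnt in count.items():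
--         if cnt >= 3:  # 有三张相同的牌
--             # 寻找剩下的两张牌
--             for value2, cnt2 in count.items():
--                 if value != value2 and cnt2 >= 2:  # 有两张相同的牌
--                     # 计算牌面值之和
--                     total_value = value * 3 + value2 * 2
--                     if total_value <= max:
--                         full_houses.append((value, value2))
--
--     # 如果没有找到合法的葫芦，返回 "0, 0"
--     if not full_houses:
--         return [0, 0]
--
--     # 按照规则：先按三张相同牌的大小排序，再按两张相同牌的大小排序 1最大
--     full_houses.sort(key=lambda x: (x[0] == 1, x[0], x[1] == 1, x[1]), reverse=True)
--
--     # 返回最大的葫芦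
--     return [full_houses[0][0], full_houses[0][1]]
-- ===== SOURCE B (Python) =====
-- from collections import Counter
--
--
-- def solution(n, max, array):
--     # Ordered greedy search: rank distinct values by Python-A's priority
--     # (Ace=1 highest, then descending), take the first triple value that
--     # admits a valid pair, and the best pair for it.
--     count = Counter(array)
--
--     def pri(v):
--         return (v == 1, v)
--
--     for t in sorted((v for v, c in count.items() if c >= 3), key=pri, reverse=True):
--         best = None
--         for p, c in count.items():
--             if c >= 2 and p != t and 3 * t + 2 * p <= max:
--                 if best is None or pri(p) > pri(best):
--                     best = p
--         if best is not None:
--             return [t, best]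
--     return [0, 0]
-- ===== Notes on version B (the rewrite author's own statement) =====
-- stated objective: alternative
-- what changed: Replaces A's enumerate-all-valid-combos-then-sort strategy by an ordered greedy early-exit search: distinct values are ranked once by the priority (Ace first, then descending); the first triple value admitting a valid pair is returned together with the best pair found by a single running-max scan, so no combo list is built and no sort over combos happens.
import Mathlib
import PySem

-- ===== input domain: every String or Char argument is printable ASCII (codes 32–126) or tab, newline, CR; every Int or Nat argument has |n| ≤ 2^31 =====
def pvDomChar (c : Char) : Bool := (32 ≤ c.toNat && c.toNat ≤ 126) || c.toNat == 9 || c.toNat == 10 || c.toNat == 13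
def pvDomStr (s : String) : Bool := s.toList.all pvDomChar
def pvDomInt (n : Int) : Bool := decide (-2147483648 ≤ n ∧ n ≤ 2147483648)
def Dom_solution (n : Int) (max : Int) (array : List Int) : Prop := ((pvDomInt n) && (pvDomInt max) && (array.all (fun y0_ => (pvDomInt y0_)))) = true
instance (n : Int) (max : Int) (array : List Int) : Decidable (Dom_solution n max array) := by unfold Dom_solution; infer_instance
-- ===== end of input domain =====

-- B replaces A's build-all-combos-then-sort by an ordered greedy early-exit search (same value).

-- ===== PORT A =====
-- keyP / keyA: mixed-radix Int encodings of Python's lexicographic sort keys (v==1, v) and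
-- (t==1, t, p==1, p); hand-ported (4-tuple keys are not in PySem) and order-isomorphic to the
-- Python tuples on Dom, where every card value satisfies |v| ≤ 2^31 < 2^33.
def keyP (v : Int) : Int := (if v = 1 then 1 else 0) * 8589934592 + v

def keyA (x : Int × Int) : Int := keyP x.1 * 17179869184 + keyP x.2

def solution (n : Int) (max : Int) (array : List Int) : List Int :=
  let count := PySem.Dict.counter array
  let fullHouses := count.items.foldl (fun acc vc =>
    if vc.2 ≥ 3 then
      count.items.foldl (fun acc2 vc2 =>
        if vc.1 ≠ vc2.1 ∧ vc2.2 ≥ 2 ∧ vc.1 * 3 + vc2.1 * 2 ≤ max then acc2 ++ [(vc.1, vc2.1)] else acc2) acc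
    else acc) []
  if fullHouses = [] then [0, 0]
  else
    let s := PySem.List.sorted fullHouses keyA true
    [(s.headD (0, 0)).1, (s.headD (0, 0)).2]

-- ===== PORT B =====
-- inner loop of Source B: running best pair (pri(p) > pri(best) is keyP q < keyP pc.1 on Dom)
def bpStep (max t : Int) (b : Option Int) (pc : Int × Int) : Option Int :=
  if pc.2 ≥ 2 ∧ pc.1 ≠ t ∧ 3 * t + 2 * pc.1 ≤ max then
    match b with
    | none => some pc.1
    | some q => if keyP q < keyP pc.1 then some pc.1 else b
  else b

def bestPair (max t : Int) (items : List (Int × Int)) : Option Int :=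
  items.foldl (bpStep max t) none

-- the 'for t in sorted(...)' loop with its early returns
def goAlt (max : Int) (items : List (Int × Int)) : List Int → List Int
  | [] => [0, 0]
  | t :: rest =>
    match bestPair max t items with
    | some p => [t, p]
    | none => goAlt max items rest

def solution_alt (n : Int) (max : Int) (array : List Int) : List Int :=
  let count := PySem.Dict.counter array
  goAlt max count.items
    (PySem.List.sorted (count.items.filterMap (fun vc => if vc.2 ≥ 3 then some vc.1 else none)) keyP true)

-- ===== PRECONDITION & SPEC =====
def Spec_solution (n : Int) (max : Int) (array : List Int) (out : List Int) : Prop := out = solution_alt n max array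
instance (n : Int) (max : Int) (array : List Int) (out : List Int) : Decidable (Spec_solution n max array out) := by unfold Spec_solution; infer_instance

-- ===== CLAIM (what is proved, stated in full; the proofs are below) =====
def Claim_equal_solution : Prop := ∀ (n : Int) (max : Int) (array : List Int), Dom_solution n max array → Spec_solution n max array (solution n max array)

-- ===== LEMMAS AND PROOFS =====

theorem keyP_bounds {v : Int} (h : -2147483648 ≤ v ∧ v ≤ 2147483648) :
    -2147483648 ≤ keyP v ∧ keyP v ≤ 8589934592 + 2147483648 := by
  unfold keyP; split_ifs <;> omega

theorem keyP_inj {a b : Int} (ha : -2147483648 ≤ a ∧ a ≤ 2147483648)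
    (hb : -2147483648 ≤ b ∧ b ≤ 2147483648) (h : keyP a = keyP b) : a = b := by
  unfold keyP at h; split_ifs at h <;> omega

theorem mem_bounds {array : List Int} (hd : array.all (fun y => pvDomInt y) = true)
    {v : Int} (hv : v ∈ array) : -2147483648 ≤ v ∧ v ≤ 2147483648 := by
  have := List.all_eq_true.mp hd v hv
  simpa [pvDomInt] using this

-- invariant of B's inner running-max fold
theorem bpStep_of_neg (max t : Int) (b : Option Int) (pc : Int × Int)
    (hc : ¬(pc.2 ≥ 2 ∧ pc.1 ≠ t ∧ 3 * t + 2 * pc.1 ≤ max)) : bpStep max t b pc = b := by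
  simp [bpStep, hc]

theorem bp_none (max t : Int) (l : List (Int × Int)) (b : Option Int) :
    l.foldl (bpStep max t) b = none ↔
      b = none ∧ ∀ pc ∈ l, ¬(pc.2 ≥ 2 ∧ pc.1 ≠ t ∧ 3 * t + 2 * pc.1 ≤ max) := by
  induction l generalizing b with
  | nil => simp
  | cons pc l ih =>
    simp only [List.foldl_cons, ih, List.mem_cons]
    by_cases hc : pc.2 ≥ 2 ∧ pc.1 ≠ t ∧ 3 * t + 2 * pc.1 ≤ max
    · have hs : ∃ r, bpStep max t b pc = some r := by
        cases b with
        | none => exact ⟨pc.1, by simp [bpStep, hc]⟩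
        | some q =>
          by_cases hlt : keyP q < keyP pc.1
          · exact ⟨pc.1, by simp [bpStep, hc, hlt]⟩
          · exact ⟨q, by simp [bpStep, hc, hlt]⟩
      obtain ⟨r, hr⟩ := hs
      rw [hr]
      constructor
      · rintro ⟨h, -⟩; cases h
      · rintro ⟨-, hall⟩; exact absurd hc (hall pc (Or.inl rfl))
    · rw [bpStep_of_neg max t b pc hc]
      constructor
      · rintro ⟨hb, hall⟩
        refine ⟨hb, ?_⟩
        rintro x (rfl | hx)
        · exact hc
        · exact hall x hx
      · rintro ⟨hb, hall⟩
        exact ⟨hb, fun x hx => hall x (Or.inr hx)⟩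

theorem bp_inv (max t : Int) (l : List (Int × Int)) (b : Option Int) (p : Int)
    (h : l.foldl (bpStep max t) b = some p) :
    (b = some p ∨ ∃ pc ∈ l, pc.1 = p ∧ (pc.2 ≥ 2 ∧ pc.1 ≠ t ∧ 3 * t + 2 * pc.1 ≤ max)) ∧
    (∀ q, b = some q → keyP q ≤ keyP p) ∧
    (∀ pc ∈ l, (pc.2 ≥ 2 ∧ pc.1 ≠ t ∧ 3 * t + 2 * pc.1 ≤ max) → keyP pc.1 ≤ keyP p) := by
  induction l generalizing b with
  | nil =>
    simp only [List.foldl_nil] at h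
    refine ⟨Or.inl h, ?_, by simp⟩
    intro q hq; rw [hq] at h; injection h with h; subst h; omega
  | cons pc l ih =>
    simp only [List.foldl_cons] at h
    by_cases hc : pc.2 ≥ 2 ∧ pc.1 ≠ t ∧ 3 * t + 2 * pc.1 ≤ max
    · cases b with
      | none =>
        have hs : bpStep max t none pc = some pc.1 := by simp [bpStep, hc]
        rw [hs] at h
        obtain ⟨h1, h2, h3⟩ := ih _ h
        have hpcp : keyP pc.1 ≤ keyP p := h2 pc.1 rfl
        refine ⟨?_, ?_, ?_⟩
        · rcases h1 with h1 | ⟨x, hx, hrest⟩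
          · exact Or.inr ⟨pc, List.mem_cons_self, by injection h1 with h1; exact ⟨h1, hc⟩⟩
          · exact Or.inr ⟨x, List.mem_cons_of_mem _ hx, hrest⟩
        · intro q hq; cases hq
        · intro x hx hcx
          rcases List.mem_cons.mp hx with rfl | hx
          · exact hpcp
          · exact h3 x hx hcx
      | some q =>
        by_cases hlt : keyP q < keyP pc.1
        · have hs : bpStep max t (some q) pc = some pc.1 := by simp [bpStep, hc, hlt]
          rw [hs] at h
          obtain ⟨h1, h2, h3⟩ := ih _ h
          have hpcp : keyP pc.1 ≤ keyP p := h2 pc.1 rfl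
          refine ⟨?_, ?_, ?_⟩
          · rcases h1 with h1 | ⟨x, hx, hrest⟩
            · exact Or.inr ⟨pc, List.mem_cons_self, by injection h1 with h1; exact ⟨h1, hc⟩⟩
            · exact Or.inr ⟨x, List.mem_cons_of_mem _ hx, hrest⟩
          · intro r hr; injection hr with hr; subst hr; omega
          · intro x hx hcx
            rcases List.mem_cons.mp hx with rfl | hx
            · exact hpcp
            · exact h3 x hx hcx
        · have hs : bpStep max t (some q) pc = some q := by simp [bpStep, hc, hlt]
          rw [hs] at h
          obtain ⟨h1, h2, h3⟩ := ih _ h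
          have hqp : keyP q ≤ keyP p := h2 q rfl
          refine ⟨?_, ?_, ?_⟩
          · rcases h1 with h1 | ⟨x, hx, hrest⟩
            · exact Or.inl h1
            · exact Or.inr ⟨x, List.mem_cons_of_mem _ hx, hrest⟩
          · intro r hr; injection hr with hr; subst hr; omega
          · intro x hx hcx
            rcases List.mem_cons.mp hx with rfl | hx
            · omega
            · exact h3 x hx hcx
    · rw [bpStep_of_neg max t b pc hc] at h
      obtain ⟨h1, h2, h3⟩ := ih _ h
      refine ⟨?_, h2, ?_⟩
      · rcases h1 with h1 | ⟨x, hx, hrest⟩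
        · exact Or.inl h1
        · exact Or.inr ⟨x, List.mem_cons_of_mem _ hx, hrest⟩
      · intro x hx hcx
        rcases List.mem_cons.mp hx with rfl | hx
        · exact absurd hcx hc
        · exact h3 x hx hcx

theorem go_none (max : Int) (items : List (Int × Int)) (ts : List Int)
    (h : ∀ t ∈ ts, bestPair max t items = none) : goAlt max items ts = [0, 0] := by
  induction ts with
  | nil => rfl
  | cons t ts ih =>
    unfold goAlt
    rw [h t List.mem_cons_self]
    exact ih (fun x hx => h x (List.mem_cons_of_mem _ hx))

theorem go_spec (max : Int) (items : List (Int × Int)) (ts : List Int)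
    (hp : ts.Pairwise (fun a b => keyP b ≤ keyP a)) (t : Int) (ht : t ∈ ts) (p : Int)
    (hbp : bestPair max t items = some p) :
    ∃ t' p', goAlt max items ts = [t', p'] ∧ t' ∈ ts ∧
      bestPair max t' items = some p' ∧ keyP t ≤ keyP t' := by
  induction ts with
  | nil => cases ht
  | cons h rest ih =>
    cases hb : bestPair max h items with
    | some q =>
      refine ⟨h, q, ?_, List.mem_cons_self, hb, ?_⟩
      · unfold goAlt; rw [hb]
      · rcases List.mem_cons.mp ht with rfl | hmem
        · omega
        · exact (List.pairwise_cons.mp hp).1 t hmem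
    | none =>
      have htr : t ∈ rest := by
        rcases List.mem_cons.mp ht with rfl | hmem
        · rw [hb] at hbp; cases hbp
        · exact hmem
      obtain ⟨t', p', hgo, ht', hbp', hk⟩ := ih (List.pairwise_cons.mp hp).2 htr
      refine ⟨t', p', ?_, List.mem_cons_of_mem _ ht', hbp', hk⟩
      unfold goAlt; rw [hb]; exact hgo

-- A's nested append-loop builds exactly this flatMap of filters
theorem Lchar (max : Int) (items : List (Int × Int)) :
    items.foldl (fun acc vc =>
      if vc.2 ≥ 3 then
        items.foldl (fun acc2 vc2 =>
          if vc.1 ≠ vc2.1 ∧ vc2.2 ≥ 2 ∧ vc.1 * 3 + vc2.1 * 2 ≤ max then acc2 ++ [(vc.1, vc2.1)] else acc2) acc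
      else acc) [] =
    items.flatMap (fun vc =>
      if vc.2 ≥ 3 then
        (items.filter (fun vc2 => decide (vc.1 ≠ vc2.1 ∧ vc2.2 ≥ 2 ∧ vc.1 * 3 + vc2.1 * 2 ≤ max))).map
          (fun vc2 => (vc.1, vc2.1))
      else []) := by
  rw [PySem.List.foldl_congr_mem (g := fun acc vc => acc ++ (if vc.2 ≥ 3 then
        (items.filter (fun vc2 => decide (vc.1 ≠ vc2.1 ∧ vc2.2 ≥ 2 ∧ vc.1 * 3 + vc2.1 * 2 ≤ max))).map
          (fun vc2 => (vc.1, vc2.1)) else []))]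
  · rw [PySem.List.foldl_append_eq_flatMap]; simp
  · intro acc vc _
    by_cases h : vc.2 ≥ 3
    · simp only [if_pos h]
      exact PySem.List.foldl_append_ite
        (p := fun (vc2 : Int × Int) => vc.1 ≠ vc2.1 ∧ vc2.2 ≥ 2 ∧ vc.1 * 3 + vc2.1 * 2 ≤ max)
        (fun (vc2 : Int × Int) => (vc.1, vc2.1)) _ _
    · simp [h]

theorem mem_L (max : Int) (array : List Int) (t p : Int) :
    (t, p) ∈ (((PySem.Set.ofList array).map fun k => (k, (array.count k : Int))).flatMap (fun vc =>
      if vc.2 ≥ 3 then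
        ((((PySem.Set.ofList array).map fun k => (k, (array.count k : Int))).filter
            (fun vc2 => decide (vc.1 ≠ vc2.1 ∧ vc2.2 ≥ 2 ∧ vc.1 * 3 + vc2.1 * 2 ≤ max))).map
          (fun vc2 => (vc.1, vc2.1)))
      else [])) ↔
    t ∈ array ∧ p ∈ array ∧ (array.count t : Int) ≥ 3 ∧ (array.count p : Int) ≥ 2 ∧ t ≠ p ∧
      t * 3 + p * 2 ≤ max := by
  constructor
  · intro h
    simp only [List.mem_flatMap, List.mem_map, PySem.Set.mem_ofList] at h
    obtain ⟨vc, ⟨k, hk, rfl⟩, hmem⟩ := h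
    by_cases h3 : (array.count k : Int) ≥ 3
    · rw [if_pos h3] at hmem
      simp only [List.mem_map, List.mem_filter, List.mem_map, PySem.Set.mem_ofList,
        decide_eq_true_eq] at hmem
      obtain ⟨vc2, ⟨⟨k2, hk2, rfl⟩, hc⟩, heq⟩ := hmem
      obtain ⟨rfl, rfl⟩ : k = t ∧ k2 = p := ⟨congrArg Prod.fst heq, congrArg Prod.snd heq⟩
      exact ⟨hk, hk2, h3, hc.2.1, hc.1, hc.2.2⟩
    · rw [if_neg h3] at hmem; cases hmem
  · rintro ⟨ht, hp, h3, h2, hne, hle⟩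
    simp only [List.mem_flatMap, List.mem_map, PySem.Set.mem_ofList]
    refine ⟨(t, (array.count t : Int)), ⟨t, ht, rfl⟩, ?_⟩
    rw [if_pos h3]
    simp only [List.mem_map, List.mem_filter, List.mem_map, PySem.Set.mem_ofList,
      decide_eq_true_eq]
    exact ⟨(p, (array.count p : Int)), ⟨⟨p, hp, rfl⟩, hne, h2, hle⟩, rfl⟩

theorem mem_T (array : List Int) (t : Int) :
    t ∈ (((PySem.Set.ofList array).map fun k => (k, (array.count k : Int))).filterMap
        (fun vc => if vc.2 ≥ 3 then some vc.1 else none)) ↔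
      t ∈ array ∧ (array.count t : Int) ≥ 3 := by
  simp only [List.mem_filterMap, List.mem_map, PySem.Set.mem_ofList]
  constructor
  · rintro ⟨vc, ⟨k, hk, rfl⟩, hvc⟩
    by_cases h3 : (array.count k : Int) ≥ 3
    · rw [if_pos h3] at hvc; injection hvc with hvc; subst hvc; exact ⟨hk, h3⟩
    · rw [if_neg h3] at hvc; cases hvc
  · rintro ⟨ht, h3⟩
    exact ⟨(t, (array.count t : Int)), ⟨t, ht, rfl⟩, by rw [if_pos h3]⟩

theorem mem_items (array : List Int) (p : Int) (hp : p ∈ array) :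
    (p, (array.count p : Int)) ∈ ((PySem.Set.ofList array).map fun k => (k, (array.count k : Int))) := by
  simp only [List.mem_map, PySem.Set.mem_ofList]
  exact ⟨p, hp, rfl⟩

theorem solution_spec : Claim_equal_solution := by
  intro n max array hdom
  have harr : array.all (fun y => pvDomInt y) = true := by
    simp only [Dom_solution, Bool.and_eq_true] at hdom
    exact hdom.2
  unfold Spec_solution solution solution_alt
  simp only [PySem.Dict.items_counter, Lchar]
  set items : List (Int × Int) := ((PySem.Set.ofList array).map fun k => (k, (array.count k : Int))) with hitems
  set L : List (Int × Int) := items.flatMap (fun vc =>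
      if vc.2 ≥ 3 then
        (items.filter (fun vc2 => decide (vc.1 ≠ vc2.1 ∧ vc2.2 ≥ 2 ∧ vc.1 * 3 + vc2.1 * 2 ≤ max))).map
          (fun vc2 => (vc.1, vc2.1))
      else []) with hLdef
  set T : List Int := items.filterMap (fun vc => if vc.2 ≥ 3 then some vc.1 else none) with hTdef
  by_cases hL : L = []
  · rw [if_pos hL]
    rw [go_none max items (PySem.List.sorted T keyP true) ?_]
    intro t ht
    rw [bestPair, bp_none]
    refine ⟨rfl, ?_⟩
    rintro pc hpc hcond
    have ht' := (PySem.List.mem_sorted _ _ _ _).mp ht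
    rw [hTdef, mem_T] at ht'
    obtain ⟨k, hk, rfl⟩ := by
      rw [hitems] at hpc
      simpa only [List.mem_map, PySem.Set.mem_ofList] using hpc
    have c2 : (array.count k : Int) ≥ 2 := hcond.1
    have cne : k ≠ t := hcond.2.1
    have cle : 3 * t + 2 * k ≤ max := hcond.2.2
    have : ((t, k) : Int × Int) ∈ L := by
      rw [hLdef, hitems, mem_L]
      exact ⟨ht'.1, hk, ht'.2, c2, fun he => cne he.symm, by omega⟩
    rw [hL] at this
    cases this
  · rw [if_neg hL]
    have hsnil : PySem.List.sorted L keyA true ≠ [] := by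
      rw [Ne, PySem.List.sorted_eq_nil_iff]; exact hL
    obtain ⟨m, tl, hs⟩ : ∃ m tl, PySem.List.sorted L keyA true = m :: tl := by
      cases h : PySem.List.sorted L keyA true with
      | nil => exact absurd h hsnil
      | cons a b => exact ⟨a, b, rfl⟩
    rw [hs]
    simp only [List.headD_cons]
    have hmL : m ∈ L := (PySem.List.mem_sorted _ _ _ _).mp (hs ▸ List.mem_cons_self)
    have hmax : ∀ y ∈ L, keyA y ≤ keyA m := PySem.List.key_head_sorted_rev_ge L keyA hs
    have hmL' := hmL
    rw [hLdef, hitems, show m = (m.1, m.2) from rfl, mem_L] at hmL'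
    obtain ⟨hm1, hm2, hc1, hc2, hne, hle⟩ := hmL'
    -- B finds a result: m.1 is in T and has a valid pair
    have hm1T : m.1 ∈ PySem.List.sorted T keyP true := by
      rw [PySem.List.mem_sorted, hTdef, mem_T]; exact ⟨hm1, hc1⟩

    have hbpne : bestPair max m.1 items ≠ none := by
      rw [bestPair, Ne, bp_none]
      rintro ⟨-, hall⟩
      exact hall (m.2, (array.count m.2 : Int)) (hitems ▸ mem_items array m.2 hm2)
        ⟨hc2, fun he => hne (he.symm), by omega⟩
    obtain ⟨p0, hbp0⟩ := Option.ne_none_iff_exists'.mp hbpne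
    obtain ⟨t', p', hgo, ht', hbp', hkt⟩ :=
      go_spec max items (PySem.List.sorted T keyP true)
        (PySem.List.sorted_pairwise_rev T keyP) m.1 hm1T p0 hbp0
    rw [hgo]
    -- facts about t'
    have ht'2 := (PySem.List.mem_sorted _ _ _ _).mp ht'
    rw [hTdef, mem_T] at ht'2
    obtain ⟨ht'arr, ht'3⟩ := ht'2
    -- facts about p'
    obtain ⟨h1, -, h3⟩ := bp_inv max t' items none p' hbp'
    rcases h1 with h1 | ⟨pc, hpc, hpcp, hcond⟩
    · cases h1
    obtain ⟨k, hk, rfl⟩ := by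
      rw [hitems] at hpc
      simpa only [List.mem_map, PySem.Set.mem_ofList] using hpc
    have hkp : p' = k := hpcp.symm
    subst hkp
    have hp2 : (array.count p' : Int) ≥ 2 := hcond.1
    have hp'ne : p' ≠ t' := hcond.2.1
    have hp'le : 3 * t' + 2 * p' ≤ max := hcond.2.2
    -- (t', p') ∈ L hence keyA (t',p') ≤ keyA m
    have htp'L : ((t', p') : Int × Int) ∈ L := by
      rw [hLdef, hitems, mem_L]
      exact ⟨ht'arr, hk, ht'3, hp2, fun he => hp'ne he.symm, by omega⟩
    have hkle : keyA (t', p') ≤ keyA (m.1, m.2) := by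
      have := hmax _ htp'L
      rwa [show m = (m.1, m.2) from rfl] at this
    -- bounds
    have hb1 := keyP_bounds (mem_bounds harr hm1)
    have hb2 := keyP_bounds (mem_bounds harr hm2)
    have hb3 := keyP_bounds (mem_bounds harr ht'arr)
    have hb4 := keyP_bounds (mem_bounds harr hk)
    rw [keyA, keyA] at hkle
    simp only at hkle
    -- keyP t' = keyP m.1, hence t' = m.1
    have hkeq : keyP t' = keyP m.1 := by omega
    have ht'm : t' = m.1 := keyP_inj (mem_bounds harr ht'arr) (mem_bounds harr hm1) hkeq
    subst ht'm
    -- keyP p' ≤ keyP m.2 and conversely, hence p' = m.2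
    have hple : keyP p' ≤ keyP m.2 := by omega
    have hm2le : keyP m.2 ≤ keyP p' := by
      refine h3 (m.2, (array.count m.2 : Int)) (hitems ▸ mem_items array m.2 hm2) ?_
      exact ⟨hc2, fun he => hne he.symm, by omega⟩
    have : p' = m.2 := keyP_inj (mem_bounds harr hk) (mem_bounds harr hm2) (by omega)
    rw [this]
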